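-- pv_equiv track=rewrite | github.com/spyderbat/spyctl | spyctl/merge_lib.py | find_list_item_prefix
-- ===== SOURCE A (Python) =====
-- from typing import Any, Callable, Dict, List, Optional, Set, Tuple, Union
--
-- LIST_MARKER = "- "
--
-- DEFAULT_WHITESPACE = "  "
--
-- def find_list_item_prefix(ancestor_fields: List[str]) -> str:
--     if len(ancestor_fields) == 0:
--         return LIST_MARKER
--     prefix = []
--     found_actual_field = False
--     for item in reversed(ancestor_fields):
--         if item == LIST_MARKER and not found_actual_field:
--             prefix.append(LIST_MARKER)
--         else:
--             found_actual_field = True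
--             prefix.append(DEFAULT_WHITESPACE)
--     prefix.reverse()
--     prefix.append(LIST_MARKER)
--     if prefix[0] == DEFAULT_WHITESPACE:
--         prefix.pop(0)
--     prefix = "".join(prefix)
--     return prefix
-- ===== SOURCE B (Python) =====
-- LIST_MARKER = "- "
--
-- DEFAULT_WHITESPACE = "  "
--
-- def find_list_item_prefix(ancestor_fields):
--     n = len(ancestor_fields)
--     if n == 0:
--         return LIST_MARKER
--     t = 0
--     while t < n and ancestor_fields[n - 1 - t] == LIST_MARKER:
--         t += 1
--     if t == n:
--         return LIST_MARKER * (n + 1)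
--     return DEFAULT_WHITESPACE * (n - 1 - t) + LIST_MARKER * (t + 1)
-- ===== Notes on version B (the rewrite author's own statement) =====
-- stated objective: simpler
-- what changed: Replaces the reversed-iteration list build, reverse, append and conditional pop(0) with a single count of trailing '- ' markers and closed-form string multiplication for the three cases (empty, all markers, mixed).
import Mathlib
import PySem

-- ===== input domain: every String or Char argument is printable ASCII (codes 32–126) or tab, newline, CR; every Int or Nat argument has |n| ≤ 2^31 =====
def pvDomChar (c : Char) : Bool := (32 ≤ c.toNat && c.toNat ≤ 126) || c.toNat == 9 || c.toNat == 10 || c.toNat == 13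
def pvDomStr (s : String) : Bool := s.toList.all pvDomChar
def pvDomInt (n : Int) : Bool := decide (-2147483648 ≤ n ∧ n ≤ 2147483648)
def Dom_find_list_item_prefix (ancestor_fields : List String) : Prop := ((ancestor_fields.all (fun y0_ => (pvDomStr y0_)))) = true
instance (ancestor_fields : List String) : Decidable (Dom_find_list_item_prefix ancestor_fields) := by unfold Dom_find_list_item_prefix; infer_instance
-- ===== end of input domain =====

-- B replaces A's per-element build/reverse/pop list machinery by counting the trailing
-- "- " markers and emitting the prefix with closed-form string repetition (objective: simpler).

-- ===== PORT A =====
-- the loop body of A: state is (prefix, found_actual_field)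
def pvAStep (s : List String × Bool) (item : String) : List String × Bool :=
  if item = "- " ∧ s.2 = false then (s.1 ++ ["- "], s.2) else (s.1 ++ ["  "], true)

def find_list_item_prefix (ancestor_fields : List String) : String :=
  if ancestor_fields.length = 0 then "- "
  else
    let st := ancestor_fields.reverse.foldl pvAStep ([], false)
    let p := st.1.reverse ++ ["- "]
    let p := if p.headD "" = "  " then p.tail else p
    String.join p

-- ===== PORT B =====
-- B's while loop: count trailing "- " entries, scanning from the end
def pvCountTrailing : List String → Nat
  | [] => 0
  | x :: rest => if x = "- " then 1 + pvCountTrailing rest else 0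

def find_list_item_prefix_alt (ancestor_fields : List String) : String :=
  let n := ancestor_fields.length
  if n = 0 then "- "
  else
    let t := pvCountTrailing ancestor_fields.reverse
    if t = n then String.join (List.replicate (n + 1) "- ")
    else String.join (List.replicate (n - 1 - t) "  ") ++ String.join (List.replicate (t + 1) "- ")

-- ===== PRECONDITION & SPEC =====
def Spec_find_list_item_prefix (ancestor_fields : List String) (out : String) : Prop := out = find_list_item_prefix_alt ancestor_fields
instance (ancestor_fields : List String) (out : String) : Decidable (Spec_find_list_item_prefix ancestor_fields out) := by unfold Spec_find_list_item_prefix; infer_instance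

-- ===== CLAIM (what is proved, stated in full; the proofs are below) =====
def Claim_equal_find_list_item_prefix : Prop := ∀ (ancestor_fields : List String), Dom_find_list_item_prefix ancestor_fields → Spec_find_list_item_prefix ancestor_fields (find_list_item_prefix ancestor_fields)

-- ===== LEMMAS AND PROOFS =====

-- once found_actual_field is true, every remaining item appends "  "
theorem pvAStep_found (ys : List String) (p : List String) :
    ys.foldl pvAStep (p, true) = (p ++ List.replicate ys.length "  ", true) := by
  induction ys generalizing p with
  | nil => simp
  | cons y ys ih =>
    simp only [List.foldl_cons]
    rw [show pvAStep (p, true) y = (p ++ ["  "], true) from by simp [pvAStep], ih]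
    simp [List.replicate_succ]

-- characterization of A's loop from an unfound state
theorem pvAStep_run (ys : List String) (p : List String) :
    ys.foldl pvAStep (p, false) =
      if pvCountTrailing ys = ys.length then
        (p ++ List.replicate ys.length "- ", false)
      else
        (p ++ List.replicate (pvCountTrailing ys) "- "
           ++ List.replicate (ys.length - pvCountTrailing ys) "  ", true) := by
  induction ys generalizing p with
  | nil => simp [pvCountTrailing]
  | cons y ys ih =>
    simp only [List.foldl_cons]
    by_cases hy : y = "- "
    · rw [show pvAStep (p, false) y = (p ++ ["- "], false) from by simp [pvAStep, hy], ih]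
      have hc : pvCountTrailing (y :: ys) = pvCountTrailing ys + 1 := by
        simp [pvCountTrailing, hy, Nat.add_comm]
      by_cases ht : pvCountTrailing ys = ys.length
      · rw [if_pos ht, if_pos (by rw [hc, List.length_cons, ht])]
        simp [List.length_cons, List.replicate_succ, List.append_assoc]
      · rw [if_neg ht, if_neg (by rw [hc, List.length_cons]; omega)]
        rw [hc, List.length_cons, Nat.succ_sub_succ]
        simp [List.replicate_succ, List.append_assoc]
    · rw [show pvAStep (p, false) y = (p ++ ["  "], true) from by simp [pvAStep, hy],
        pvAStep_found]
      have hc : pvCountTrailing (y :: ys) = 0 := by simp [pvCountTrailing, hy]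
      rw [if_neg (by rw [hc, List.length_cons]; omega)]
      rw [hc, List.length_cons, Nat.sub_zero]
      simp [List.replicate_succ, List.append_assoc]

theorem pvJoin_foldl (l : List String) (a : String) :
    l.foldl (fun r s => r ++ s) a = a ++ String.join l := by
  induction l generalizing a with
  | nil => simp [String.join]
  | cons x xs ih =>
    simp only [String.join, List.foldl_cons]
    rw [ih (a ++ x), ih ("" ++ x)]
    simp [String.append_assoc]

theorem pvJoin_append (l1 l2 : List String) :
    String.join (l1 ++ l2) = String.join l1 ++ String.join l2 := by
  show (l1 ++ l2).foldl (fun r s => r ++ s) "" = _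
  rw [List.foldl_append, pvJoin_foldl]; rfl

theorem pvCountTrailing_le (ys : List String) : pvCountTrailing ys ≤ ys.length := by
  induction ys with
  | nil => simp [pvCountTrailing]
  | cons y ys ih => simp only [pvCountTrailing, List.length_cons]; split <;> omega

-- ===== VERDICT (by name: the statement is the Claim_ definition above) =====
theorem find_list_item_prefix_spec : Claim_equal_find_list_item_prefix := by
  intro xs _
  unfold Spec_find_list_item_prefix find_list_item_prefix find_list_item_prefix_alt
  by_cases h0 : xs.length = 0
  · simp [h0]
  · rw [if_neg h0, if_neg h0]
    rw [pvAStep_run]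
    have hle : pvCountTrailing xs.reverse ≤ xs.length := by
      have := pvCountTrailing_le xs.reverse
      simpa using this
    set t := pvCountTrailing xs.reverse with ht
    by_cases hAll : t = xs.reverse.length
    · have hAll' : t = xs.length := by simpa using hAll
      rw [if_pos hAll, if_pos hAll']
      simp only [List.nil_append, List.reverse_replicate, ← List.replicate_succ']
      rw [if_neg (by
        obtain ⟨m, hm⟩ : ∃ m, xs.length = m + 1 := ⟨xs.length - 1, by omega⟩
        simp [hm, List.replicate_succ] )]
      rw [show xs.reverse.length = xs.length from List.length_reverse]
    · have hAll' : ¬ t = xs.length := by simpa using hAll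
      rw [if_neg hAll, if_neg hAll']
      have htlt : t < xs.length := by omega
      simp only [List.nil_append, List.reverse_append, List.reverse_replicate,
        List.length_reverse]
      rw [List.append_assoc]
      have hrew : xs.length - t = (xs.length - 1 - t) + 1 := by omega
      rw [hrew, List.replicate_succ]
      simp only [List.cons_append, List.headD_cons, List.tail_cons]
      rw [if_pos trivial, ← List.replicate_succ', pvJoin_append]
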